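-- pv_equiv track=rewrite | github.com/phobo-at/pi-hub | smart_display/watch_faces.py | _phrase_from_grid
-- ===== SOURCE A (Python) =====
-- def _phrase_from_grid(
--     grid: tuple[str, ...], cells: list[list[int]]
-- ) -> str:
--     active = {(r, c) for r, c in cells}
--     words: list[str] = []
--     for row_idx, row in enumerate(grid):
--         current: list[str] = []
--         for col_idx, letter in enumerate(row):
--             if (row_idx, col_idx) in active:
--                 current.append(letter)
--             elif current:
--                 words.append("".join(current))
--                 current = []
--         if current:
--             words.append("".join(current))
--     return " ".join(words)
-- ===== SOURCE B (Python) =====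
-- def _phrase_from_grid(grid, cells):
--     words = []
--     for r, row in enumerate(grid):
--         cols = sorted({c for rr, c in cells if rr == r and 0 <= c < len(row)})
--         prev = None
--         cur = ""
--         for c in cols:
--             if prev is not None and c == prev + 1:
--                 cur += row[c]
--             else:
--                 if cur:
--                     words.append(cur)
--                 cur = row[c]
--             prev = c
--         if cur:
--             words.append(cur)
--     return " ".join(words)
-- ===== Notes on version B (the rewrite author's own statement) =====
-- stated objective: alternative
-- what changed: B builds the phrase from the active cells themselves (dedupe, keep in-bounds ones, sort the columns per row, join runs of consecutive columns into words) instead of A's scan over every character of the grid with a membership test.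
import Mathlib
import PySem

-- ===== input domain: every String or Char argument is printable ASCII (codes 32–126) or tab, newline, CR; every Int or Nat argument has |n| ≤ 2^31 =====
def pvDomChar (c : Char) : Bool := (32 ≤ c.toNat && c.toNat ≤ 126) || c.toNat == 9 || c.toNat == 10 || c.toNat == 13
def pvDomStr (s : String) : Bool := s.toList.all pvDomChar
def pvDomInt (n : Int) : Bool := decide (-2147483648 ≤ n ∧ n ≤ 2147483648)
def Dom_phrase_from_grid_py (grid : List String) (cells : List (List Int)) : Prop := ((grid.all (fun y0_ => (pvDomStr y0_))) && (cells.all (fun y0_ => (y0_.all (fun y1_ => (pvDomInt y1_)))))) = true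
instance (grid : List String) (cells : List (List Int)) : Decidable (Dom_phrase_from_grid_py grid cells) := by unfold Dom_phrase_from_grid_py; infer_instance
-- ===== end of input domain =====

-- B replaces A's scan over every character of the grid by a walk over the (deduplicated,
-- in-bounds, sorted) active cells themselves, building each word from runs of consecutive
-- columns — a cells-driven instead of a grid-driven traversal (objective: alternative).

-- ===== PORT A =====
-- cell [r, c] → (r, c); other cell shapes raise ValueError in Python and are excluded by Pre_
def pvCellPair (cell : List Int) : Int × Int :=
  match cell with
  | [r, c] => (r, c)
  | _ => (0, 0)

def pvAInner (active : PySem.Set (Int × Int)) (rowIdx : Int)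
    (st : List String × List Char) (e : Int × Char) : List String × List Char :=
  if PySem.Set.contains active (rowIdx, e.1) then (st.1, st.2 ++ [e.2])
  else if st.2 ≠ [] then (st.1 ++ [String.ofList st.2], [])
  else st

def pvARow (active : PySem.Set (Int × Int)) (words : List String) (e : Int × String) : List String :=
  let st := (PySem.List.enumerate e.2.toList).foldl (pvAInner active e.1) (words, ([] : List Char))
  if st.2 ≠ [] then st.1 ++ [String.ofList st.2] else st.1

def phrase_from_grid_py (grid : List String) (cells : List (List Int)) : String :=
  let active : PySem.Set (Int × Int) := PySem.Set.ofList (cells.map pvCellPair)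
  PySem.Str.join " " ((PySem.List.enumerate grid).foldl (pvARow active) [])

-- ===== PORT B =====
-- {c for rr, c in cells if rr == r and 0 <= c < n}
def pvColPick (r n : Int) (cell : List Int) : Option Int :=
  match cell with
  | [rr, c] => if rr = r ∧ 0 ≤ c ∧ c < n then some c else none
  | _ => none

def pvBColSet (cells : List (List Int)) (r : Int) (n : Int) : PySem.Set Int :=
  PySem.Set.ofList (cells.filterMap (pvColPick r n))

-- row[c]; the column filter guarantees 0 ≤ c < len(row), so the default is never read
def pvCharAt (row : List Char) (c : Int) : Char :=
  (PySem.List.pyGet? row c).getD ' '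

def pvBStep (row : List Char) (st : List String × List Char × Option Int) (c : Int) :
    List String × List Char × Option Int :=
  match st.2.2 with
  | some p =>
    if c = p + 1 then (st.1, st.2.1 ++ [pvCharAt row c], some c)
    else ((if st.2.1 ≠ [] then st.1 ++ [String.ofList st.2.1] else st.1), [pvCharAt row c], some c)
  | none => ((if st.2.1 ≠ [] then st.1 ++ [String.ofList st.2.1] else st.1), [pvCharAt row c], some c)

def pvBRow (cells : List (List Int)) (words : List String) (e : Int × String) : List String :=
  let cols := PySem.List.sorted (pvBColSet cells e.1 (PySem.Str.len e.2)) (fun x => x) false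
  let st := cols.foldl (pvBStep e.2.toList) (words, ([] : List Char), (none : Option Int))
  if st.2.1 ≠ [] then st.1 ++ [String.ofList st.2.1] else st.1

def phrase_from_grid_py_alt (grid : List String) (cells : List (List Int)) : String :=
  PySem.Str.join " " ((PySem.List.enumerate grid).foldl (pvBRow cells) [])

-- ===== PRECONDITION & SPEC =====
-- Pre_ excludes cells that are not 2-element lists, on which A's unpacking 'for r, c in cells' raises ValueError.
def Pre_phrase_from_grid_py (grid : List String) (cells : List (List Int)) : Prop :=
  ∀ cell ∈ cells, cell.length = 2
instance (grid : List String) (cells : List (List Int)) : Decidable (Pre_phrase_from_grid_py grid cells) := by unfold Pre_phrase_from_grid_py; infer_instance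

def pvWitness_phrase_from_grid_py : List String × List (List Int) :=
  (["hi there"], [[0, 0], [0, 1], [0, 3], [0, 4], [0, 5], [0, 6], [0, 7], [2, 0], [0, -1], [0, 0]])

def Spec_phrase_from_grid_py (grid : List String) (cells : List (List Int)) (out : String) : Prop := out = phrase_from_grid_py_alt grid cells
instance (grid : List String) (cells : List (List Int)) (out : String) : Decidable (Spec_phrase_from_grid_py grid cells out) := by unfold Spec_phrase_from_grid_py; infer_instance

-- ===== CLAIM (what is proved, stated in full; the proofs are below) =====
def Claim_equal_phrase_from_grid_py : Prop := ∀ (grid : List String) (cells : List (List Int)), Dom_phrase_from_grid_py grid cells → Pre_phrase_from_grid_py grid cells → Spec_phrase_from_grid_py grid cells (phrase_from_grid_py grid cells)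

-- ===== LEMMAS AND PROOFS =====

-- proof-side abbreviations for the two row loops
def pvAFold (active : PySem.Set (Int × Int)) (r : Int) (words : List String)
    (chars : List Char) : List String × List Char :=
  (PySem.List.enumerate chars).foldl (pvAInner active r) (words, ([] : List Char))

def pvBFold (row : List Char) (cols : List Int) (words : List String) :
    List String × List Char × Option Int :=
  cols.foldl (pvBStep row) (words, ([] : List Char), (none : Option Int))

-- the active columns of a row, left to right: proof-side description shared by both ports
def pvCols (act : Int → Bool) (n : Nat) : List Int :=
  ((List.range n).map (Nat.cast : Nat → Int)).filter act

-- the invariant tying A's mid-row state to B's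
def pvInv (n : Int) (A : List String × List Char)
    (B : List String × List Char × Option Int) : Prop :=
  (A.2 = [] → A.1 = (if B.2.1 ≠ [] then B.1 ++ [String.ofList B.2.1] else B.1)
     ∧ (∀ p, B.2.2 = some p → p + 2 ≤ n)
     ∧ (B.2.2 = none → B.2.1 = []))
  ∧ (A.2 ≠ [] → B.1 = A.1 ∧ B.2.1 = A.2 ∧ B.2.2 = some (n - 1))

lemma pvCols_succ (act : Int → Bool) (n : Nat) :
    pvCols act (n + 1) = pvCols act n ++ (if act n then [(n : Int)] else []) := by
  by_cases h : act (n : Int) <;> simp [pvCols, List.range_succ, List.filter_append, h]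

lemma pvCols_mem_bound (act : Int → Bool) (n : Nat) {c : Int} (h : c ∈ pvCols act n) :
    0 ≤ c ∧ c < n := by
  simp only [pvCols, List.mem_filter, List.mem_map, List.mem_range] at h
  obtain ⟨⟨k, hk, rfl⟩, _⟩ := h
  omega

lemma pvCols_pairwise (act : Int → Bool) (n : Nat) :
    (pvCols act n).Pairwise (· < ·) := by
  have h1 : (((List.range n).map (Nat.cast : Nat → Int))).Pairwise (· < ·) :=
    List.Pairwise.map _ (fun a b h => by exact_mod_cast h) List.pairwise_lt_range
  exact h1.sublist List.filter_sublist

lemma pvCols_nodup (act : Int → Bool) (n : Nat) : (pvCols act n).Nodup :=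
  (pvCols_pairwise act n).imp (fun h => by omega)

-- the sorted column set B builds equals the in-order list of active columns A visits
lemma pvCols_eq (cells : List (List Int)) (r : Int) (n : Nat)
    (hpre : ∀ cell ∈ cells, cell.length = 2) :
    PySem.List.sorted (pvBColSet cells r (n : Int)) (fun x => x) false
      = pvCols (fun c => PySem.Set.contains (PySem.Set.ofList (cells.map pvCellPair)) (r, c)) n := by
  apply PySem.List.sorted_eq_of_perm_of_pairwise_lt
  · have hnd : (pvBColSet cells r (n : Int)).Nodup := PySem.Set.nodup_ofList _
    rw [List.perm_ext_iff_of_nodup (pvCols_nodup _ _) hnd]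
    intro c
    simp only [pvCols, List.mem_filter, List.mem_map, List.mem_range, pvBColSet,
      PySem.Set.contains_iff, PySem.Set.mem_ofList, List.mem_filterMap]
    constructor
    · rintro ⟨⟨k, hk, rfl⟩, hact⟩
      obtain ⟨cell, hcell, hpair⟩ := hact
      have h2 := hpre cell hcell
      match cell, h2 with
      | [a, b], _ =>
        refine ⟨[a, b], hcell, ?_⟩
        rw [show pvCellPair [a, b] = (a, b) from rfl, Prod.mk.injEq] at hpair
        obtain ⟨ha, hb⟩ := hpair
        subst ha; subst hb
        rw [show pvColPick a (↑n) [a, (↑k : Int)]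
            = if a = a ∧ 0 ≤ (↑k : Int) ∧ (↑k : Int) < (↑n : Int) then some (↑k : Int) else none from rfl]
        rw [if_pos ⟨rfl, by exact_mod_cast Nat.zero_le k, by exact_mod_cast hk⟩]
    · rintro ⟨cell, hcell, hsome⟩
      have h2 := hpre cell hcell
      match cell, h2 with
      | [a, b], _ =>
        rw [show pvColPick r (↑n) [a, b]
            = if a = r ∧ 0 ≤ b ∧ b < (↑n : Int) then some b else none from rfl] at hsome
        split at hsome
        · rename_i hcond
          obtain ⟨ha, hb0, hbn⟩ := hcond
          cases hsome
          refine ⟨⟨c.toNat, by omega, by omega⟩, ?_⟩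
          exact ⟨[a, c], hcell, by rw [show pvCellPair [a, c] = (a, c) from rfl, ha]⟩
        · cases hsome
  · exact pvCols_pairwise _ _

lemma pvCharAt_append_left (chars : List Char) (ch : Char) (c : Int)
    (h0 : 0 ≤ c) (hn : c < chars.length) :
    pvCharAt (chars ++ [ch]) c = pvCharAt chars c := by
  unfold pvCharAt
  rw [PySem.List.pyGet?_of_nonneg _ h0, PySem.List.pyGet?_of_nonneg _ h0]
  rw [List.getElem?_append_left (by omega)]

lemma pvCharAt_append_length (chars : List Char) (ch : Char) :
    pvCharAt (chars ++ [ch]) (chars.length : Int) = ch := by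
  unfold pvCharAt
  rw [show chars ++ [ch] = chars ++ ch :: [] from rfl, PySem.List.pyGet?_append_length]
  rfl

lemma pvBStep_row_congr (row row' : List Char) (st : List String × List Char × Option Int)
    (c : Int) (h : pvCharAt row c = pvCharAt row' c) :
    pvBStep row st c = pvBStep row' st c := by
  simp only [pvBStep, h]

lemma pvBFold_row_congr (chars : List Char) (ch : Char) (act : Int → Bool)
    (words : List String) :
    pvBFold (chars ++ [ch]) (pvCols act chars.length) words
      = pvBFold chars (pvCols act chars.length) words := by
  unfold pvBFold
  apply PySem.List.foldl_congr_mem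
  intro acc x hx
  obtain ⟨h0, hn⟩ := pvCols_mem_bound act chars.length hx
  exact pvBStep_row_congr _ _ _ _ (pvCharAt_append_left chars ch x h0 hn)

lemma pvBStep_none (row : List Char) (st : List String × List Char × Option Int) (c : Int)
    (h : st.2.2 = none) :
    pvBStep row st c
      = ((if st.2.1 ≠ [] then st.1 ++ [String.ofList st.2.1] else st.1), [pvCharAt row c], some c) := by
  unfold pvBStep; rw [h]

lemma pvBStep_some_eq (row : List Char) (st : List String × List Char × Option Int) (c p : Int)
    (h : st.2.2 = some p) (hc : c = p + 1) :
    pvBStep row st c = (st.1, st.2.1 ++ [pvCharAt row c], some c) := by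
  unfold pvBStep; rw [h]; exact if_pos hc

lemma pvBStep_some_ne (row : List Char) (st : List String × List Char × Option Int) (c p : Int)
    (h : st.2.2 = some p) (hc : ¬ c = p + 1) :
    pvBStep row st c
      = ((if st.2.1 ≠ [] then st.1 ++ [String.ofList st.2.1] else st.1), [pvCharAt row c], some c) := by
  unfold pvBStep; rw [h]; exact if_neg hc

-- the core row invariant: A's left-to-right scan and B's walk of the active columns
lemma pvRowInv (active : PySem.Set (Int × Int)) (r : Int) (chars : List Char)
    (words : List String) :
    pvInv (chars.length : Int) (pvAFold active r words chars)
      (pvBFold chars (pvCols (fun c => PySem.Set.contains active (r, c)) chars.length) words) := by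
  induction chars using List.reverseRecOn with
  | nil =>
    constructor
    · intro _
      refine ⟨by simp [pvAFold, pvBFold, pvCols, PySem.List.enumerate_nil], ?_, ?_⟩
      · intro p hp; simp [pvBFold, pvCols] at hp
      · intro _; simp [pvBFold, pvCols]
    · intro h
      exact absurd (by simp [pvAFold, PySem.List.enumerate_nil]) h
  | append_singleton chars ch ih =>
    have hA : pvAFold active r words (chars ++ [ch])
        = pvAInner active r (pvAFold active r words chars) ((chars.length : Int), ch) := by
      simp [pvAFold, PySem.List.enumerate_append, PySem.List.enumerate_cons,
        PySem.List.enumerate_nil, List.foldl_append]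
    have hcols : pvCols (fun c => PySem.Set.contains active (r, c)) (chars ++ [ch]).length
        = pvCols (fun c => PySem.Set.contains active (r, c)) chars.length
            ++ (if PySem.Set.contains active (r, (chars.length : Int)) then [(chars.length : Int)] else []) := by
      rw [List.length_append, List.length_cons, List.length_nil, Nat.add_zero]
      exact pvCols_succ _ _
    have hlen : ((chars ++ [ch]).length : Int) = (chars.length : Int) + 1 := by
      rw [List.length_append]; push_cast; norm_num
    set act := fun c => PySem.Set.contains active (r, c) with hactdef
    set A := pvAFold active r words chars with hAdef
    set B := pvBFold chars (pvCols act chars.length) words with hBdef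
    have hBpre : pvBFold (chars ++ [ch]) (pvCols act chars.length) words = B :=
      pvBFold_row_congr chars ch act words
    obtain ⟨ihnil, ihcons⟩ := ih
    rw [hA, hcols]
    by_cases hact : act (chars.length : Int)
    · -- the new column is active: A appends the letter, B walks one more column
      rw [if_pos hact]
      have hBfull : pvBFold (chars ++ [ch])
          (pvCols act chars.length ++ [(chars.length : Int)]) words
          = pvBStep (chars ++ [ch]) B (chars.length : Int) := by
        unfold pvBFold at hBpre ⊢
        rw [List.foldl_append, hBpre]
        rfl
      rw [hBfull]
      have hAstep : pvAInner active r A ((chars.length : Int), ch) = (A.1, A.2 ++ [ch]) := by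
        unfold pvAInner
        rw [if_pos hact]
      rw [hAstep]
      have hch := pvCharAt_append_length chars ch
      by_cases hA2 : A.2 = []
      · obtain ⟨hflush, hp, hnone⟩ := ihnil hA2
        rcases hB3 : B.2.2 with _ | p
        · -- no previous column: B starts a fresh word
          have hcB : B.2.1 = [] := hnone hB3
          rw [pvBStep_none _ _ _ hB3, hch]
          refine ⟨fun habs => by simp at habs, fun _ => ⟨?_, by simp [hA2], ?_⟩⟩
          · show (if B.2.1 ≠ [] then B.1 ++ [String.ofList B.2.1] else B.1) = A.1
            rw [hflush]
          · show some (chars.length : Int) = some (((chars ++ [ch]).length : Int) - 1)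
            rw [hlen]; norm_num
        · -- previous run ended at least two columns back: B flushes and starts anew
          have hplt : ¬ ((chars.length : Int) = p + 1) := by
            have := hp p hB3; omega
          rw [pvBStep_some_ne _ _ _ _ hB3 hplt, hch]
          refine ⟨fun habs => by simp at habs, fun _ => ⟨?_, by simp [hA2], ?_⟩⟩
          · show (if B.2.1 ≠ [] then B.1 ++ [String.ofList B.2.1] else B.1) = A.1
            rw [hflush]
          · show some (chars.length : Int) = some (((chars ++ [ch]).length : Int) - 1)
            rw [hlen]; norm_num
      · obtain ⟨hB1, hB2, hB3⟩ := ihcons hA2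
        -- B continues the current run
        rw [pvBStep_some_eq _ _ _ _ hB3 (by ring), hch]
        refine ⟨fun habs => by simp at habs, fun _ => ⟨hB1, by rw [hB2], ?_⟩⟩
        show some (chars.length : Int) = some (((chars ++ [ch]).length : Int) - 1)
        rw [hlen]; norm_num
    · -- the new column is inactive: A flushes its current word (if any), B is unchanged
      rw [if_neg hact]
      rw [List.append_nil, hBpre]
      have hAstep : pvAInner active r A ((chars.length : Int), ch)
          = if A.2 ≠ [] then (A.1 ++ [String.ofList A.2], []) else A := by
        unfold pvAInner
        rw [if_neg hact]
      rw [hAstep]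
      by_cases hA2 : A.2 = []
      · rw [if_neg (by simp [hA2])]
        obtain ⟨hflush, hp, hnone⟩ := ihnil hA2
        refine ⟨fun _ => ⟨hflush, fun p hp' => ?_, hnone⟩, fun h => absurd hA2 h⟩
        have := hp p hp'
        rw [hlen]; omega
      · rw [if_pos hA2]
        obtain ⟨hB1, hB2, hB3⟩ := ihcons hA2
        refine ⟨fun _ => ⟨?_, fun p hp' => ?_, fun hn => ?_⟩, fun h => by simp at h⟩
        · show (A.1 ++ [String.ofList A.2] : List String)
            = (if B.2.1 ≠ [] then B.1 ++ [String.ofList B.2.1] else B.1)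
          have hcB : B.2.1 ≠ [] := by rw [hB2]; exact hA2
          rw [if_pos hcB, hB1, hB2]
        · rw [hB3] at hp'
          cases hp'
          rw [hlen]; omega
        · rw [hB3] at hn; cases hn

-- flushing both final states gives the same word list
lemma pvRow_eq (active : PySem.Set (Int × Int)) (r : Int) (chars : List Char)
    (words : List String) :
    (if (pvAFold active r words chars).2 ≠ []
       then (pvAFold active r words chars).1 ++ [String.ofList (pvAFold active r words chars).2]
       else (pvAFold active r words chars).1)
    = (if (pvBFold chars (pvCols (fun c => PySem.Set.contains active (r, c)) chars.length) words).2.1 ≠ []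
       then (pvBFold chars (pvCols (fun c => PySem.Set.contains active (r, c)) chars.length) words).1
              ++ [String.ofList (pvBFold chars (pvCols (fun c => PySem.Set.contains active (r, c)) chars.length) words).2.1]
       else (pvBFold chars (pvCols (fun c => PySem.Set.contains active (r, c)) chars.length) words).1) := by
  obtain ⟨hnil, hcons⟩ := pvRowInv active r chars words
  set A := pvAFold active r words chars
  set B := pvBFold chars (pvCols (fun c => PySem.Set.contains active (r, c)) chars.length) words
  by_cases hA2 : A.2 = []
  · obtain ⟨hflush, -, -⟩ := hnil hA2
    rw [if_neg (by simp [hA2]), hflush]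
  · obtain ⟨hB1, hB2, -⟩ := hcons hA2
    rw [if_pos hA2, if_pos (by rw [hB2]; exact hA2), hB1, hB2]

lemma pvARow_eq_flush (active : PySem.Set (Int × Int)) (ws : List String) (e : Int × String) :
    pvARow active ws e
      = (if (pvAFold active e.1 ws e.2.toList).2 ≠ []
         then (pvAFold active e.1 ws e.2.toList).1 ++ [String.ofList (pvAFold active e.1 ws e.2.toList).2]
         else (pvAFold active e.1 ws e.2.toList).1) := rfl

lemma pvBRow_eq_flush (cells : List (List Int)) (ws : List String) (e : Int × String) :
    pvBRow cells ws e
      = (if (pvBFold e.2.toList (PySem.List.sorted (pvBColSet cells e.1 (PySem.Str.len e.2)) (fun x => x) false) ws).2.1 ≠ []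
         then (pvBFold e.2.toList (PySem.List.sorted (pvBColSet cells e.1 (PySem.Str.len e.2)) (fun x => x) false) ws).1
                ++ [String.ofList (pvBFold e.2.toList (PySem.List.sorted (pvBColSet cells e.1 (PySem.Str.len e.2)) (fun x => x) false) ws).2.1]
         else (pvBFold e.2.toList (PySem.List.sorted (pvBColSet cells e.1 (PySem.Str.len e.2)) (fun x => x) false) ws).1) := rfl

lemma pvRow_ab (cells : List (List Int)) (hpre : ∀ cell ∈ cells, cell.length = 2)
    (ws : List String) (e : Int × String) :
    pvARow (PySem.Set.ofList (cells.map pvCellPair)) ws e = pvBRow cells ws e := by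
  rw [pvARow_eq_flush, pvBRow_eq_flush]
  rw [PySem.Str.len_eq, pvCols_eq cells e.1 e.2.toList.length hpre]
  exact pvRow_eq _ e.1 e.2.toList ws

-- ===== VERDICT (by name: the statement is the Claim_ definition above) =====
theorem phrase_from_grid_py_spec : Claim_equal_phrase_from_grid_py := by
  intro grid cells _ hpre
  unfold Spec_phrase_from_grid_py phrase_from_grid_py phrase_from_grid_py_alt
  show PySem.Str.join " " (List.foldl (pvARow (PySem.Set.ofList (List.map pvCellPair cells))) [] (PySem.List.enumerate grid))
    = PySem.Str.join " " (List.foldl (pvBRow cells) [] (PySem.List.enumerate grid))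
  congr 1
  apply PySem.List.foldl_congr_mem
  intro acc e _
  exact pvRow_ab cells hpre acc e
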